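-- pv_equiv track=rewrite | github.com/krishna-shah-07/6Companies30Days | 2513.py | minimizeSet
-- ===== SOURCE A (Python) =====
-- def minimizeSet(divisor1: int, divisor2: int, uniqueCnt1: int, uniqueCnt2: int) -> int:
--     def gcd(a, b):
--         while b:
--             a, b = b, a % b
--         return a
--
--     def lcm(a, b):
--         return a // gcd(a, b) * b
--
--     def is_feasible(max_val):
--         divisible_by_div1 = max_val // divisor1
--         divisible_by_div2 = max_val // divisor2
--         divisible_by_both = max_val // lcm(divisor1, divisor2)
--
--         not_div1 = max_val - divisible_by_div1
--         not_div2 = max_val - divisible_by_div2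
--         not_either = max_val - (divisible_by_div1 + divisible_by_div2 - divisible_by_both)
--
--         if not_div1 < uniqueCnt1 or not_div2 < uniqueCnt2:
--             return False
--         return not_div1 + not_div2 - not_either >= uniqueCnt1 + uniqueCnt2
--
--     left, right = uniqueCnt1 + uniqueCnt2, 10**18
--     while left < right:
--         mid = (left + right) // 2
--         if is_feasible(mid):
--             right = mid
--         else:
--             left = mid + 1
--
--     return left
-- ===== SOURCE B (Python) =====
-- def minimizeSet(divisor1: int, divisor2: int, uniqueCnt1: int, uniqueCnt2: int) -> int:
--     def gcd(a, b):
--         while b: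
--             a, b = b, a % b
--         return a
--
--     def threshold(d, c):
--         # least x with x - x // d >= c, i.e. the c-th integer not divisible by d
--         return (c - 1) * d // (d - 1) + 1
--
--     total = uniqueCnt1 + uniqueCnt2
--     lcm = divisor1 // gcd(divisor1, divisor2) * divisor2
--
--     # the answer is at least total (that many distinct positive integers are needed)
--     return max(total,
--                threshold(divisor1, uniqueCnt1),
--                threshold(divisor2, uniqueCnt2),
--                threshold(lcm, total))
-- ===== Notes on version B (the rewrite author's own statement) =====
-- stated objective: alternative
-- what changed: Replaces the binary search over [uniqueCnt1+uniqueCnt2, 10^18] by one closed-form threshold per divisor constraint ((c-1)*d//(d-1)+1, the c-th integer not divisible by d) and returns the maximum of the three thresholds and the total count; Pre_ excludes divisors 0 and 1, on which A raises ZeroDivisionError resp. returns its search cap 10^18 (an artefact of the search bound) where B's closed form raises ZeroDivisionError.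
-- outside the precondition, e.g. on minimizeSet(1, 3, 2, 2): A returns 1000000000000000000, B raises ZeroDivisionError; on minimizeSet(5, 1, 2, 3): A returns 1000000000000000000, B raises ZeroDivisionError
import Mathlib
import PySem

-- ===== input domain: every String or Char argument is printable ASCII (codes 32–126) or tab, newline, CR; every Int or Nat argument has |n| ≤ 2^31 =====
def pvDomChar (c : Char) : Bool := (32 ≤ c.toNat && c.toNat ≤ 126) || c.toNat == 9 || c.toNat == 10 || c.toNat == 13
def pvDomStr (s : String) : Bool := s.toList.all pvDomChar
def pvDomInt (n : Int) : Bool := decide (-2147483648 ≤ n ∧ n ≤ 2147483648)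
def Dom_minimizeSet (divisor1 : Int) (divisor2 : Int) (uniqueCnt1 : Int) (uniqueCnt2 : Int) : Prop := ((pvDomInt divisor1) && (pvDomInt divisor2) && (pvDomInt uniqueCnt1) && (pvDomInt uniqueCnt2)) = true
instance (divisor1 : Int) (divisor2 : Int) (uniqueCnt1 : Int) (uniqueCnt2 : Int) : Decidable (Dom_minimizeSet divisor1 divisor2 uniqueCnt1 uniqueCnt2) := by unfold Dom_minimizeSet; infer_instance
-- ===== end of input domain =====

-- B replaces A's binary search over [uniqueCnt1+uniqueCnt2, 10^18] by one closed-form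
-- threshold per divisor constraint (objective: alternative; the constant cost of either
-- version is too small for a timing run to measure).

-- Termination facts the ports cite: |a % b| < |b| for b ≠ 0 (Python %), and the
-- binary-search midpoint shrinks the bracket.
theorem pvModAbsLt (a b : Int) (h : ¬ b = 0) : (PySem.Int.mod a b).natAbs < b.natAbs := by
  rcases lt_or_gt_of_ne h with hb | hb
  · have := PySem.Int.mod_neg_bounds a hb; omega
  · have h1 := PySem.Int.mod_nonneg a hb
    have h2 := PySem.Int.mod_lt a hb
    omega

theorem pvMidLtR (left right : Int) (h : left < right) :
    (PySem.Int.floordiv (left + right) 2 - left).toNat < (right - left).toNat := by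
  have hm : PySem.Int.floordiv (left + right) 2 = (left + right) / 2 :=
    PySem.Int.floordiv_eq_ediv_of_pos (by norm_num)
  omega

theorem pvMidLtL (left right : Int) (h : left < right) :
    (right - (PySem.Int.floordiv (left + right) 2 + 1)).toNat < (right - left).toNat := by
  have hm : PySem.Int.floordiv (left + right) 2 = (left + right) / 2 :=
    PySem.Int.floordiv_eq_ediv_of_pos (by norm_num)
  omega

-- ===== PORT A =====
def pvGcdA (a b : Int) : Int :=
  if h : b = 0 then a else pvGcdA b (PySem.Int.mod a b)
termination_by b.natAbs
decreasing_by exact pvModAbsLt a b h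

def pvLcmA (a b : Int) : Int := PySem.Int.floordiv a (pvGcdA a b) * b

def pvFeasA (divisor1 divisor2 uniqueCnt1 uniqueCnt2 maxVal : Int) : Bool :=
  let divisibleByDiv1 := PySem.Int.floordiv maxVal divisor1
  let divisibleByDiv2 := PySem.Int.floordiv maxVal divisor2
  let divisibleByBoth := PySem.Int.floordiv maxVal (pvLcmA divisor1 divisor2)
  let notDiv1 := maxVal - divisibleByDiv1
  let notDiv2 := maxVal - divisibleByDiv2
  let notEither := maxVal - (divisibleByDiv1 + divisibleByDiv2 - divisibleByBoth)
  if notDiv1 < uniqueCnt1 ∨ notDiv2 < uniqueCnt2 then false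
  else decide (notDiv1 + notDiv2 - notEither ≥ uniqueCnt1 + uniqueCnt2)

def pvLoopA (F : Int → Bool) (left right : Int) : Int :=
  if h : left < right then
    let mid := PySem.Int.floordiv (left + right) 2
    if F mid then pvLoopA F left mid else pvLoopA F (mid + 1) right
  else left
termination_by (right - left).toNat
decreasing_by
  · exact pvMidLtR left right h
  · exact pvMidLtL left right h

def minimizeSet (divisor1 : Int) (divisor2 : Int) (uniqueCnt1 : Int) (uniqueCnt2 : Int) : Int :=
  pvLoopA (pvFeasA divisor1 divisor2 uniqueCnt1 uniqueCnt2)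
    (uniqueCnt1 + uniqueCnt2) 1000000000000000000

-- ===== PORT B =====
def pvGcdB (a b : Int) : Int :=
  if h : b = 0 then a else pvGcdB b (PySem.Int.mod a b)
termination_by b.natAbs
decreasing_by exact pvModAbsLt a b h

-- least x with x - x//d >= c, i.e. the c-th integer not divisible by d
def pvThreshB (d c : Int) : Int :=
  PySem.Int.floordiv ((c - 1) * d) (d - 1) + 1

def minimizeSet_alt (divisor1 : Int) (divisor2 : Int) (uniqueCnt1 : Int) (uniqueCnt2 : Int) : Int :=
  let total := uniqueCnt1 + uniqueCnt2
  let lcm := PySem.Int.floordiv divisor1 (pvGcdB divisor1 divisor2) * divisor2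
  max (max (max total (pvThreshB divisor1 uniqueCnt1)) (pvThreshB divisor2 uniqueCnt2))
      (pvThreshB lcm total)

-- ===== PRECONDITION & SPEC =====
-- Pre_ excludes divisors 0 and 1: with a zero divisor A raises ZeroDivisionError; with a
-- divisor 1 the required count of non-divisible integers is unattainable, A returns its
-- binary-search cap 10^18 (an artefact of the search bound) while B's closed form raises
-- ZeroDivisionError there.
def Pre_minimizeSet (divisor1 : Int) (divisor2 : Int) (uniqueCnt1 : Int) (uniqueCnt2 : Int) : Prop :=
  divisor1 ≠ 0 ∧ divisor1 ≠ 1 ∧ divisor2 ≠ 0 ∧ divisor2 ≠ 1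
instance (divisor1 : Int) (divisor2 : Int) (uniqueCnt1 : Int) (uniqueCnt2 : Int) : Decidable (Pre_minimizeSet divisor1 divisor2 uniqueCnt1 uniqueCnt2) := by unfold Pre_minimizeSet; infer_instance
def pvWitness_minimizeSet : Int × Int × Int × Int := (3, 7, 1, 2)

def Spec_minimizeSet (divisor1 : Int) (divisor2 : Int) (uniqueCnt1 : Int) (uniqueCnt2 : Int) (out : Int) : Prop := out = minimizeSet_alt divisor1 divisor2 uniqueCnt1 uniqueCnt2
instance (divisor1 : Int) (divisor2 : Int) (uniqueCnt1 : Int) (uniqueCnt2 : Int) (out : Int) : Decidable (Spec_minimizeSet divisor1 divisor2 uniqueCnt1 uniqueCnt2 out) := by unfold Spec_minimizeSet; infer_instance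

-- ===== CLAIM (what is proved, stated in full; the proofs are below) =====
def Claim_equal_minimizeSet : Prop := ∀ (divisor1 : Int) (divisor2 : Int) (uniqueCnt1 : Int) (uniqueCnt2 : Int), Dom_minimizeSet divisor1 divisor2 uniqueCnt1 uniqueCnt2 → Pre_minimizeSet divisor1 divisor2 uniqueCnt1 uniqueCnt2 → Spec_minimizeSet divisor1 divisor2 uniqueCnt1 uniqueCnt2 (minimizeSet divisor1 divisor2 uniqueCnt1 uniqueCnt2)

-- ===== LEMMAS AND PROOFS =====

theorem sign_sq (a : Int) (h : a ≠ 0) : a.sign * a.sign = 1 := by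
  rcases lt_or_gt_of_ne h with h' | h'
  · simp [Int.sign_eq_neg_one_of_neg h']
  · simp [Int.sign_eq_one_of_pos h']

-- A's gcd: the sign of the second argument times the mathematical gcd.
theorem pvGcdA_eq (a b : Int) : b ≠ 0 → pvGcdA a b = b.sign * Int.gcd a b := by
  induction a, b using pvGcdA.induct with
  | case1 a => intro h; exact absurd rfl h
  | case2 a b h ih =>
    intro _
    rw [pvGcdA, dif_neg h]
    have hmod : PySem.Int.mod a b = a + b * (-(PySem.Int.floordiv a b)) := by
      linear_combination PySem.Int.floordiv_mul_add_mod a b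
    by_cases hr : PySem.Int.mod a b = 0
    · rw [hr, pvGcdA]
      simp only [dite_true]
      have hd : b ∣ a := (PySem.Int.mod_eq_zero_iff_dvd a b).mp hr
      rw [Int.gcd_eq_natAbs_right_iff_dvd.mpr hd, Int.sign_mul_natAbs]
    · rw [ih hr]
      have hg : Int.gcd b (PySem.Int.mod a b) = Int.gcd a b := by
        rw [hmod, Int.gcd_add_mul_left_right, Int.gcd_comm]
      have hsign : (PySem.Int.mod a b).sign = b.sign := by
        rcases lt_or_gt_of_ne h with hb | hb
        · have := PySem.Int.mod_neg_bounds a hb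
          have h1 : PySem.Int.mod a b < 0 := by omega
          rw [Int.sign_eq_neg_one_of_neg h1, Int.sign_eq_neg_one_of_neg hb]
        · have h1 := PySem.Int.mod_nonneg a hb
          have h2 : 0 < PySem.Int.mod a b := by omega
          rw [Int.sign_eq_one_of_pos h2, Int.sign_eq_one_of_pos hb]
      rw [hsign, hg]

theorem pvGcdA_dvd (d1 d2 : Int) (h2 : d2 ≠ 0) : pvGcdA d1 d2 ∣ d1 := by
  rw [pvGcdA_eq d1 d2 h2]
  obtain ⟨c, hc⟩ := Int.gcd_dvd_left d1 d2
  exact ⟨d2.sign * c, by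
    calc d1 = ((Int.gcd d1 d2 : Nat) : Int) * c := hc
      _ = d2.sign * d2.sign * (((Int.gcd d1 d2 : Nat) : Int) * c) := by rw [sign_sq d2 h2]; ring
      _ = d2.sign * ((Int.gcd d1 d2 : Nat) : Int) * (d2.sign * c) := by ring⟩

theorem pvLcmA_quot (d1 d2 : Int) (h2 : d2 ≠ 0) :
    PySem.Int.floordiv d1 (pvGcdA d1 d2) * (pvGcdA d1 d2) = d1 := by
  have h := PySem.Int.floordiv_mul_add_mod d1 (pvGcdA d1 d2)
  rw [(PySem.Int.mod_eq_zero_iff_dvd _ _).mpr (pvGcdA_dvd d1 d2 h2)] at h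
  omega

theorem pvLcm_ne' (d1 d2 : Int) (h1 : d1 ≠ 0) (h2 : d2 ≠ 0) : pvLcmA d1 d2 ≠ 0 := by
  unfold pvLcmA
  refine mul_ne_zero (fun hq => h1 ?_) h2
  have h := pvLcmA_quot d1 d2 h2
  rw [hq, zero_mul] at h
  omega

-- B's gcd is the same Euclid loop as A's.
theorem pvGcdB_eq_A (a b : Int) : pvGcdB a b = pvGcdA a b := by
  induction a, b using pvGcdB.induct with
  | case1 a => rw [pvGcdB, pvGcdA]; simp
  | case2 a b h ih => rw [pvGcdB, pvGcdA, dif_neg h, dif_neg h, ih]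

-- A's lcm is never 1 when both divisors avoid {0, 1}.
theorem pvLcm_ne_one (d1 d2 : Int) (h10 : d1 ≠ 0) (h11 : d1 ≠ 1) (h20 : d2 ≠ 0) (h21 : d2 ≠ 1) :
    pvLcmA d1 d2 ≠ 1 := by
  intro hL
  unfold pvLcmA at hL
  rcases Int.mul_eq_one_iff_eq_one_or_neg_one.mp hL with ⟨-, h⟩ | ⟨hq, h⟩
  · exact h21 h
  · -- d2 = -1, quotient = -1: gcd = pvGcdA d1 (-1) and quotient * gcd = d1
    have hquot := pvLcmA_quot d1 d2 h20
    have hg : pvGcdA d1 d2 = -1 := by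
      rw [pvGcdA_eq d1 d2 h20, h]
      simp [Int.gcd]
    rw [hq, hg] at hquot
    exact h11 (by omega)

-- floor division bracket for a NEGATIVE divisor: floordiv a b ≤ k ↔ (k+1)*b < a.
theorem floordiv_le_iff_neg (a b k : Int) (hb : b < 0) :
    PySem.Int.floordiv a b ≤ k ↔ (k + 1) * b < a := by
  have hx := PySem.Int.floordiv_mul_add_mod a b
  have hr := PySem.Int.mod_neg_bounds a hb
  set q := PySem.Int.floordiv a b
  set r := PySem.Int.mod a b
  constructor
  · intro h
    nlinarith [mul_le_mul_of_nonpos_right h (le_of_lt hb)]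
  · intro h
    by_contra h'
    nlinarith [mul_le_mul_of_nonpos_right (show k + 1 ≤ q by omega) (le_of_lt hb)]

-- the closed form is exactly the threshold of the constraint c ≤ x - x//d.
theorem thresh_iff (d c x : Int) (hd0 : d ≠ 0) (hd1 : d ≠ 1) :
    (c ≤ x - PySem.Int.floordiv x d) ↔ pvThreshB d c ≤ x := by
  rw [pvThreshB]
  rcases lt_or_gt_of_ne hd0 with h | h
  · have l1 : PySem.Int.floordiv x d ≤ x - c ↔ (x - c + 1) * d < x :=
      floordiv_le_iff_neg x d (x - c) h
    have l2 := floordiv_le_iff_neg ((c - 1) * d) (d - 1) (x - 1) (by omega)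
    rw [show (x - 1 + 1) * (d - 1) = x * (d - 1) from by ring] at l2
    have key' : ((x - c + 1) * d < x) ↔ (x * (d - 1) < (c - 1) * d) := by
      constructor <;> intro hk <;> nlinarith
    omega
  · have hd2 : 2 ≤ d := by omega
    have l1 : PySem.Int.floordiv x d < x - c + 1 ↔ x < (x - c + 1) * d :=
      PySem.Int.floordiv_lt_iff_lt_mul (by omega)
    have l2 : PySem.Int.floordiv ((c - 1) * d) (d - 1) < x ↔ (c - 1) * d < x * (d - 1) :=
      PySem.Int.floordiv_lt_iff_lt_mul (by omega)
    have key : (x < (x - c + 1) * d) ↔ ((c - 1) * d < x * (d - 1)) := by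
      constructor <;> intro hk <;> nlinarith
    omega

-- the closed form is at most 2|c-1| + 2 (so far below A's 10^18 search cap).
theorem thresh_le (d c : Int) (hd0 : d ≠ 0) (hd1 : d ≠ 1) :
    pvThreshB d c ≤ 2 * |c - 1| + 2 := by
  rw [pvThreshB]
  set u := c - 1
  have hu1 : u ≤ |u| := le_abs_self u
  have hu2 : -u ≤ |u| := neg_le_abs u
  have hu0 : 0 ≤ |u| := abs_nonneg u
  rcases lt_or_gt_of_ne hd0 with h | h
  · have := (floordiv_le_iff_neg (u * d) (d - 1) (2 * |u| + 1) (by omega)).mpr (by nlinarith)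
    omega
  · have hd2 : 2 ≤ d := by omega
    have := (PySem.Int.floordiv_lt_iff_lt_mul (b := d - 1) (by omega)
      (a := u * d) (q := 2 * |u| + 2)).mpr (by nlinarith)
    omega

theorem feas_iff (d1 d2 c1 c2 x : Int) :
    pvFeasA d1 d2 c1 c2 x = true ↔
      (c1 ≤ x - PySem.Int.floordiv x d1 ∧ c2 ≤ x - PySem.Int.floordiv x d2 ∧
       c1 + c2 ≤ x - PySem.Int.floordiv x (pvLcmA d1 d2)) := by
  simp only [pvFeasA]
  split_ifs with h
  · simp only [false_iff]; omega
  · simp only [decide_eq_true_eq]; omega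

-- The binary search returns max left (min t right) when F is thresholded by t on [left, right).
theorem pvLoopA_eq (F : Int → Bool) (t : Int) : ∀ (l r : Int),
    (∀ x, l ≤ x → x < r → (F x = true ↔ t ≤ x)) → l ≤ r →
    pvLoopA F l r = max l (min t r) := by
  suffices H : ∀ (n : Nat) (l r : Int), (r - l).toNat = n →
      (∀ x, l ≤ x → x < r → (F x = true ↔ t ≤ x)) → l ≤ r →
      pvLoopA F l r = max l (min t r) by
    exact fun l r hF hlr => H (r - l).toNat l r rfl hF hlr
  intro n
  induction n using Nat.strong_induction_on with
  | _ n ih =>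
    intro l r hn hF hlr
    rw [pvLoopA]
    by_cases h : l < r
    · rw [dif_pos h]
      have hmid : PySem.Int.floordiv (l + r) 2 = (l + r) / 2 :=
        PySem.Int.floordiv_eq_ediv_of_pos (by norm_num)
      have hb : l ≤ PySem.Int.floordiv (l + r) 2 ∧ PySem.Int.floordiv (l + r) 2 < r := by omega
      show (if F (PySem.Int.floordiv (l + r) 2) then pvLoopA F l (PySem.Int.floordiv (l + r) 2)
            else pvLoopA F (PySem.Int.floordiv (l + r) 2 + 1) r) = max l (min t r)
      set mid := PySem.Int.floordiv (l + r) 2 with hmdef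
      by_cases hf : F mid
      · rw [if_pos hf]
        have ht : t ≤ mid := (hF mid hb.1 hb.2).mp hf
        rw [ih (mid - l).toNat (by omega) l mid rfl
            (fun x hx1 hx2 => hF x hx1 (by omega)) (by omega)]
        omega
      · rw [if_neg hf]
        have ht : ¬ t ≤ mid := fun hc => hf ((hF mid hb.1 hb.2).mpr hc)
        rw [ih (r - (mid + 1)).toNat (by omega) (mid + 1) r rfl
            (fun x hx1 hx2 => hF x (by omega) hx2) (by omega)]
        omega
    · rw [dif_neg h]
      omega

-- ===== VERDICT (by name: the statement is the Claim_ definition above) =====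
theorem minimizeSet_spec : Claim_equal_minimizeSet := by
  intro d1 d2 c1 c2 hDom hPre
  obtain ⟨h10, h11, h20, h21⟩ := hPre
  simp only [Dom_minimizeSet, pvDomInt, Bool.and_eq_true, decide_eq_true_eq] at hDom
  show pvLoopA (pvFeasA d1 d2 c1 c2) (c1 + c2) 1000000000000000000 = _
  show _ = max (max (max (c1 + c2) (pvThreshB d1 c1)) (pvThreshB d2 c2))
      (pvThreshB (PySem.Int.floordiv d1 (pvGcdB d1 d2) * d2) (c1 + c2))
  rw [pvGcdB_eq_A]
  have hL0 : pvLcmA d1 d2 ≠ 0 := pvLcm_ne' d1 d2 h10 h20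
  have hL1 : pvLcmA d1 d2 ≠ 1 := pvLcm_ne_one d1 d2 h10 h11 h20 h21
  have hLdef : pvLcmA d1 d2 = PySem.Int.floordiv d1 (pvGcdA d1 d2) * d2 := rfl
  rw [← hLdef]
  set t1 := pvThreshB d1 c1
  set t2 := pvThreshB d2 c2
  set t3 := pvThreshB (pvLcmA d1 d2) (c1 + c2)
  have hT : pvLoopA (pvFeasA d1 d2 c1 c2) (c1 + c2) 1000000000000000000 =
      max (c1 + c2) (min (max t1 (max t2 t3)) 1000000000000000000) := by
    apply pvLoopA_eq
    · intro x hx1 hx2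
      rw [feas_iff, thresh_iff d1 c1 x h10 h11, thresh_iff d2 c2 x h20 h21,
          thresh_iff (pvLcmA d1 d2) (c1 + c2) x hL0 hL1]
      omega
    · omega
  have b1 := thresh_le d1 c1 h10 h11
  have b2 := thresh_le d2 c2 h20 h21
  have b3 := thresh_le (pvLcmA d1 d2) (c1 + c2) hL0 hL1
  rw [hT]
  have a1 : |c1 - 1| ≤ 2147483649 := by rw [abs_le]; omega
  have a2 : |c2 - 1| ≤ 2147483649 := by rw [abs_le]; omega
  have a3 : |c1 + c2 - 1| ≤ 4294967297 := by rw [abs_le]; omega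
  omega
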